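-- pv_equiv track=rewrite | github.com/NajmiHassan/Advent_of_Code_2024 | Day9/part1n2comb.py | get_file_positions
-- ===== SOURCE A (Python) =====
-- def get_file_positions(blocks):
--     """Get the start position and length of each file in the blocks"""
--     file_positions = {}  # {file_id: (start_pos, length)}
--     current_file = None
--     start_pos = None
--     length = 0
--
--     for pos, block in enumerate(blocks):
--         if block != '.':  # It's a file block
--             if current_file != block:  # Start of new file
--                 if current_file is not None:
--                     file_positions[current_file] = (start_pos, length)
--                 current_file = block
--                 start_pos = pos
--                 length = 1
--             else:  # Continuation of current file
--                 length += 1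
--         elif current_file is not None:  # End of file
--             file_positions[current_file] = (start_pos, length)
--             current_file = None
--             length = 0
--
--     # Handle last file if it ends at the end of blocks
--     if current_file is not None:
--         file_positions[current_file] = (start_pos, length)
--
--     return file_positions
-- ===== SOURCE B (Python) =====
-- def get_file_positions(blocks):
--     """Get the start position and length of each file in the blocks"""
--     file_positions = {}
--     n = len(blocks)
--     i = 0
--     while i < n:
--         j = i + 1
--         while j < n and blocks[j] == blocks[i]:
--             j += 1
--         if blocks[i] != '.':
--             file_positions[blocks[i]] = (i, j - i)
--         i = j
--     return file_positions
-- ===== Notes on version B (the rewrite author's own statement) =====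
-- stated objective: simpler
-- what changed: Replaces A's element-at-a-time state machine (current_file/start_pos/length carried across iterations plus a trailing flush branch) with an outer loop that consumes one maximal run of equal blocks per step and records non-'.' runs directly.
import Mathlib
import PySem

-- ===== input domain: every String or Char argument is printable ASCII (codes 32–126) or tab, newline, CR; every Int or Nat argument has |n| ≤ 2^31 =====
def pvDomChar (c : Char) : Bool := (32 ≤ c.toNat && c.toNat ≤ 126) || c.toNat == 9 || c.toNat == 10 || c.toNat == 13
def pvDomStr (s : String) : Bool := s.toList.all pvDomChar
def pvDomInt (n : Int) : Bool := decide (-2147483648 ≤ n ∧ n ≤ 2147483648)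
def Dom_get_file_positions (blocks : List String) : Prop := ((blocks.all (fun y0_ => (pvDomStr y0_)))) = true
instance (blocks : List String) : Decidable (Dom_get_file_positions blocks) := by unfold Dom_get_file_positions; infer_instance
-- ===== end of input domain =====

-- B replaces A's element-at-a-time current_file/start_pos/length state machine (with its trailing
-- flush) by an outer loop that consumes one maximal run of equal blocks per iteration (objective:
-- simpler — no carried state across iterations, no flush branch); equal return value proved below.

-- ===== PORT A =====
-- state: (file_positions, current_file, start_pos, length)
-- start_pos is Option Int (Python None); the `.getD 0` defaults are unreachable: whenever
-- current_file is `some`, start_pos is `some` too (Python reads the int there).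
def aStep (st : PySem.Dict String (Int × Int) × Option String × Option Int × Int)
    (pb : Int × String) : PySem.Dict String (Int × Int) × Option String × Option Int × Int :=
  let (d, cur, sp, len) := st
  let (pos, block) := pb
  if block ≠ "." then
    if cur ≠ some block then
      let d' := match cur with
        | some c => d.insert c (sp.getD 0, len)
        | none => d
      (d', some block, some pos, 1)
    else
      (d, cur, sp, len + 1)
  else
    match cur with
    | some c => (d.insert c (sp.getD 0, len), none, sp, 0)
    | none => (d, cur, sp, len)

-- the trailing "handle last file" if-block
def aFinish (st : PySem.Dict String (Int × Int) × Option String × Option Int × Int) :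
    PySem.Dict String (Int × Int) :=
  match st with
  | (d, some c, sp, len) => d.insert c (sp.getD 0, len)
  | (d, none, _, _) => d

def get_file_positions (blocks : List String) : List (String × Int × Int) :=
  (aFinish ((PySem.List.enumerate blocks 0).foldl aStep
    (PySem.Dict.empty, none, none, 0))).items

-- ===== PORT B =====
-- outer while: each iteration consumes the maximal run of blocks equal to blocks[i]
-- (the inner `while j < n and blocks[j] == blocks[i]` is the takeWhile below).
def bLoop (blocks : List String) (i : Int) (d : PySem.Dict String (Int × Int)) :
    PySem.Dict String (Int × Int) :=
  match blocks with
  | [] => d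
  | b :: rest =>
    let j : Int := i + 1 + (rest.takeWhile (fun x => x == b)).length
    let d' := if b ≠ "." then d.insert b (i, j - i) else d
    bLoop (rest.dropWhile (fun x => x == b)) j d'
termination_by blocks.length
decreasing_by
  have := List.length_dropWhile_le (p := fun x => x == b) (l := rest)
  simp; omega

def get_file_positions_alt (blocks : List String) : List (String × Int × Int) :=
  (bLoop blocks 0 PySem.Dict.empty).items

-- ===== PRECONDITION & SPEC =====
def Spec_get_file_positions (blocks : List String) (out : List (String × Int × Int)) : Prop := out = get_file_positions_alt blocks
instance (blocks : List String) (out : List (String × Int × Int)) : Decidable (Spec_get_file_positions blocks out) := by unfold Spec_get_file_positions; infer_instance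

-- ===== CLAIM (what is proved, stated in full; the proofs are below) =====
def Claim_equal_get_file_positions : Prop := ∀ (blocks : List String), Dom_get_file_positions blocks → Spec_get_file_positions blocks (get_file_positions blocks)

-- ===== LEMMAS AND PROOFS =====

-- A's fold over a run of blocks equal to b (b a file id) just increments `length`.
lemma runA (b : String) (hb : b ≠ ".") :
    ∀ (rest : List String) (p : Int) (d : PySem.Dict String (Int × Int)) (s l : Int),
    (PySem.List.enumerate rest p).foldl aStep (d, some b, some s, l)
      = (PySem.List.enumerate (rest.dropWhile (fun x => x == b))
           (p + (rest.takeWhile (fun x => x == b)).length)).foldl aStep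
          (d, some b, some s, l + (rest.takeWhile (fun x => x == b)).length) := by
  intro rest
  induction rest with
  | nil => intro p d s l; simp
  | cons x xs ih =>
    intro p d s l
    by_cases hx : x = b
    · subst hx
      simp only [List.takeWhile_cons, List.dropWhile_cons, beq_self_eq_true, if_true,
        PySem.List.enumerate_cons, List.foldl_cons]
      have hstep : aStep (d, some x, some s, l) (p, x) = (d, some x, some s, l + 1) := by
        simp [aStep, hb]
      rw [hstep, ih (p + 1) d s (l + 1)]
      simp only [List.length_cons]
      push_cast
      ring_nf
    · have hxb : (x == b) = false := by simp [hx]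
      simp [hxb]

-- A's fold over a run of '.' blocks while no file is open leaves the state unchanged.
lemma dotsA :
    ∀ (rest : List String) (p : Int) (d : PySem.Dict String (Int × Int)) (s : Option Int),
    (PySem.List.enumerate rest p).foldl aStep (d, none, s, 0)
      = (PySem.List.enumerate (rest.dropWhile (fun x => x == "."))
           (p + (rest.takeWhile (fun x => x == ".")).length)).foldl aStep (d, none, s, 0) := by
  intro rest
  induction rest with
  | nil => intro p d s; simp
  | cons x xs ih =>
    intro p d s
    by_cases hx : x = "."
    · subst hx
      simp only [List.takeWhile_cons, List.dropWhile_cons, beq_self_eq_true, if_true,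
        PySem.List.enumerate_cons, List.foldl_cons]
      have hstep : aStep (d, none, s, 0) (p, ".") = (d, none, s, 0) := by simp [aStep]
      rw [hstep, ih (p + 1) d s]
      simp only [List.length_cons]
      push_cast
      ring_nf
    · have hxb : (x == ".") = false := by simp [hx]
      simp [hxb]

-- main invariant: from a closed state, A's remaining fold + flush equals B's run loop.
lemma mainA : ∀ (n : Nat) (blocks : List String), blocks.length ≤ n →
    ∀ (p : Int) (d : PySem.Dict String (Int × Int)) (s : Option Int),
    aFinish ((PySem.List.enumerate blocks p).foldl aStep (d, none, s, 0)) = bLoop blocks p d := by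
  intro n
  induction n with
  | zero =>
    intro blocks hlen p d s
    have : blocks = [] := List.eq_nil_of_length_eq_zero (Nat.le_zero.mp hlen)
    subst this; simp [aFinish, bLoop]
  | succ n ih =>
    intro blocks hlen p d s
    match blocks with
    | [] => simp [aFinish, bLoop]
    | b :: rest =>
      have hrest : rest.length ≤ n := by
        simpa using Nat.lt_succ_iff.mp (Nat.lt_of_lt_of_le (by simp) hlen)
      by_cases hb : b = "."
      · -- dot run: A skips it element by element, B skips it as one run
        subst hb
        rw [bLoop]
        simp only [ne_eq, not_true_eq_false, if_false]
        simp only [PySem.List.enumerate_cons, List.foldl_cons]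
        have hstep : aStep (d, none, s, 0) (p, ".") = (d, none, s, 0) := by simp [aStep]
        rw [hstep, dotsA rest (p + 1) d s]
        have hdl : (rest.dropWhile (fun x => x == ".")).length ≤ n :=
          le_trans (List.length_dropWhile_le _ _) hrest
        rw [ih _ hdl]
      · -- file run of id b
        rw [bLoop]
        simp only [ne_eq, hb, not_false_eq_true, if_true]
        simp only [PySem.List.enumerate_cons, List.foldl_cons]
        have hstep : aStep (d, none, s, 0) (p, b) = (d, some b, some p, 1) := by
          simp [aStep, hb]
        rw [hstep, runA b hb rest (p + 1) d p 1]
        have hval : ((p, (1 : Int) + ((rest.takeWhile (fun x => x == b)).length : Int)) : Int × Int)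
            = (p, p + 1 + ((rest.takeWhile (fun x => x == b)).length : Int) - p) := by
          rw [Prod.mk.injEq]; exact ⟨rfl, by ring⟩
        have hdl0 : (rest.dropWhile (fun x => x == b)).length ≤ n :=
          le_trans (List.length_dropWhile_le _ _) hrest
        cases hysE : rest.dropWhile (fun x => x == b) with
        | nil =>
          simp only [PySem.List.enumerate_nil, List.foldl_nil, aFinish, bLoop, Option.getD_some]
          rw [hval]
        | cons y ys' =>
          have hy : (y == b) = false := by
            have := List.head?_dropWhile_not (fun x => x == b) rest
            rw [hysE] at this; simpa using this
          have hyb : y ≠ b := by simpa using hy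
          rw [hysE] at hdl0
          rw [PySem.List.enumerate_cons, List.foldl_cons]
          have ihys := ih (y :: ys') hdl0
            (p + 1 + ((rest.takeWhile (fun x => x == b)).length : Int))
            (d.insert b (p, p + 1 + ((rest.takeWhile (fun x => x == b)).length : Int) - p)) (some p)
          rw [PySem.List.enumerate_cons, List.foldl_cons] at ihys
          by_cases hyd : y = "."
          · subst hyd
            have h1 : aStep (d, some b, some p,
                  1 + ((rest.takeWhile (fun x => x == b)).length : Int))
                  (p + 1 + ((rest.takeWhile (fun x => x == b)).length : Int), ".")
                = (d.insert b (p, 1 + ((rest.takeWhile (fun x => x == b)).length : Int)),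
                   none, some p, 0) := by
              simp [aStep]
            have h2 : aStep (d.insert b (p, p + 1 + ((rest.takeWhile (fun x => x == b)).length : Int) - p),
                  none, some p, 0)
                  (p + 1 + ((rest.takeWhile (fun x => x == b)).length : Int), ".")
                = (d.insert b (p, p + 1 + ((rest.takeWhile (fun x => x == b)).length : Int) - p),
                   none, some p, 0) := by
              simp [aStep]
            rw [h1, hval]
            rw [h2] at ihys
            exact ihys
          · have h1 : aStep (d, some b, some p,
                  1 + ((rest.takeWhile (fun x => x == b)).length : Int))
                  (p + 1 + ((rest.takeWhile (fun x => x == b)).length : Int), y)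
                = (d.insert b (p, 1 + ((rest.takeWhile (fun x => x == b)).length : Int)),
                   some y, some (p + 1 + ((rest.takeWhile (fun x => x == b)).length : Int)), 1) := by
              have hne : ¬ ((some b : Option String) = some y) := by simp [Ne.symm hyb]
              simp [aStep, hyd, hne]
            have h2 : aStep (d.insert b (p, p + 1 + ((rest.takeWhile (fun x => x == b)).length : Int) - p),
                  none, some p, 0)
                  (p + 1 + ((rest.takeWhile (fun x => x == b)).length : Int), y)
                = (d.insert b (p, p + 1 + ((rest.takeWhile (fun x => x == b)).length : Int) - p),
                   some y, some (p + 1 + ((rest.takeWhile (fun x => x == b)).length : Int)), 1) := by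
              simp [aStep, hyd]
            rw [h1, hval]
            rw [h2] at ihys
            exact ihys

-- ===== VERDICT (by name: the statement is the Claim_ definition above) =====
theorem get_file_positions_spec : Claim_equal_get_file_positions := by
  intro blocks _
  unfold Spec_get_file_positions get_file_positions get_file_positions_alt
  rw [mainA blocks.length blocks le_rfl 0 PySem.Dict.empty none]
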